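-- pv_equiv track=rewrite | github.com/daniel-reich/ubiquitous-fiesta | HaMCeHeJkaWvMg7LS_9.py | sun_loungers
-- ===== SOURCE A (Python) =====
-- def sun_loungers(beach):
--     count, last = 0, True
--     nex = beach[0] == "0"
--     for i in range(len(beach)-1):
--         if nex:
--             nex = beach[i + 1] == "0"
--             if last and nex:
--                 count += 1
--                 last = False
--             else:
--                 last = True
--         else:
--             nex = beach[i + 1] == "0"
--             last = False
--     return count + (last*(beach[-1] == "0"))
-- ===== SOURCE B (Python) =====
-- def sun_loungers(beach):
--     # Run-length reformulation: pad each end of the beach with one virtual free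
--     # cell; each maximal run of k free cells then holds (k - 1) // 2 loungers.
--     runs = []
--     n = 1  # virtual free cell before the beach
--     for c in beach:
--         if c == "0":
--             n += 1
--         else:
--             runs.append(n)
--             n = 0
--     runs.append(n + 1)  # virtual free cell after the beach
--     return sum((k - 1) // 2 for k in runs if k)
-- ===== Notes on version B (the rewrite author's own statement) =====
-- stated objective: simpler
-- what changed: Replaces A's per-character state machine (count/last/nex flags with lookahead indexing) by a run-length reformulation: build the list of maximal free-run lengths with one virtual free cell padded on each end, then sum the closed form (k-1)//2 per run.
-- crash fix: On the empty string A raises IndexError (it reads beach[0]); B returns 0. — e.g. on sun_loungers(""): A raises IndexError, B returns 0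
import Mathlib
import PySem

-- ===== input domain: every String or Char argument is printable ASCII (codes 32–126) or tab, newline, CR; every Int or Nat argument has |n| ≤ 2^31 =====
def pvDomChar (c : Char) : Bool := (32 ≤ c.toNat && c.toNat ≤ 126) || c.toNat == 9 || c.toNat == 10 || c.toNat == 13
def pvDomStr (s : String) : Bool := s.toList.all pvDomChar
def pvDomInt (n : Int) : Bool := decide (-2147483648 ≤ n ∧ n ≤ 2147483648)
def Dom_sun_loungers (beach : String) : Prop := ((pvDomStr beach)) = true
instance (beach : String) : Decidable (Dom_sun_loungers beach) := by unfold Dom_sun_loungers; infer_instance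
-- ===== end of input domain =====

-- B replaces A's per-character last/nex state machine by a run-length reformulation
-- (pad each end with a virtual free cell; each run of k free cells holds (k-1)//2
-- loungers); objective: simpler.

-- ===== PORT A =====
-- one loop step of A's state machine; state = (count, last, nex)
def pvStepA (cs : List Char) (st : Int × Bool × Bool) (i : Int) : Int × Bool × Bool :=
  let count := st.1; let last := st.2.1; let nex := st.2.2
  if nex then
    let nex := PySem.List.pyGetD cs (i + 1) ' ' == '0'
    if last && nex then (count + 1, false, nex) else (count, true, nex)
  else
    (count, false, PySem.List.pyGetD cs (i + 1) ' ' == '0')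

def sun_loungers (beach : String) : Int :=
  let cs := beach.toList
  let r := (PySem.List.pyRange 0 ((cs.length : Int) - 1)).foldl (pvStepA cs)
    (0, true, PySem.List.pyGetD cs 0 ' ' == '0')
  r.1 + (if r.2.1 && (PySem.List.pyGetD cs (-1) ' ' == '0') then 1 else 0)

-- ===== PORT B =====
-- run-building step: state = (finished run lengths, current run length)
def pvStepB (st : List Int × Int) (c : Char) : List Int × Int :=
  if c == '0' then (st.1, st.2 + 1) else (st.1 ++ [st.2], 0)

def sun_loungers_alt (beach : String) : Int :=
  let p := beach.toList.foldl pvStepB ([], 1)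
  let runs := p.1 ++ [p.2 + 1]
  runs.foldl (fun total k => if k ≠ 0 then total + PySem.Int.floordiv (k - 1) 2 else total) 0

-- ===== PRECONDITION & SPEC =====
-- A reads beach[0] and raises IndexError on the empty string; Pre_ excludes exactly that.
def Pre_sun_loungers (beach : String) : Prop := beach ≠ ""
instance (beach : String) : Decidable (Pre_sun_loungers beach) := by
  unfold Pre_sun_loungers; infer_instance
def pvWitness_sun_loungers : String := "0010"

-- A raises IndexError on the empty beach; B naturally returns 0 there.
def Raises_sun_loungers (beach : String) : Prop := beach = ""
instance (beach : String) : Decidable (Raises_sun_loungers beach) := by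
  unfold Raises_sun_loungers; infer_instance
def pvRaiseWitness_sun_loungers : String := ""
def pvRaiseWitnessOut_sun_loungers : Int := 0

def Spec_sun_loungers (beach : String) (out : Int) : Prop := out = sun_loungers_alt beach
instance (beach : String) (out : Int) : Decidable (Spec_sun_loungers beach out) := by
  unfold Spec_sun_loungers; infer_instance

-- ===== CLAIM (what is proved, stated in full; the proofs are below) =====
def Claim_equal_sun_loungers : Prop := ∀ (beach : String), Dom_sun_loungers beach →
  Pre_sun_loungers beach → Spec_sun_loungers beach (sun_loungers beach)
def Claim_raises_sun_loungers : Prop :=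
  (∀ (beach : String), Dom_sun_loungers beach → Raises_sun_loungers beach →
    ¬ Pre_sun_loungers beach) ∧
  (Dom_sun_loungers (pvRaiseWitness_sun_loungers) ∧
    Raises_sun_loungers (pvRaiseWitness_sun_loungers) ∧
    sun_loungers_alt (pvRaiseWitness_sun_loungers) = pvRaiseWitnessOut_sun_loungers)

-- ===== LEMMAS AND PROOFS =====

-- A's machine, structurally: fA last cur rest (cur = current cell free?, rest = cells ahead)
def pvFA : Bool → Bool → List Bool → Int
  | last, cur, [] => if last && cur then 1 else 0
  | last, cur, b :: r => if cur then (if last && b then 1 + pvFA false b r else pvFA true b r)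
                         else pvFA false b r

-- B's per-run count
def pvC (k : Int) : Int := if k ≠ 0 then (k - 1) / 2 else 0

-- B's computation as a function of the remaining cells and the current run length
def pvR : Int → List Bool → Int
  | n, [] => pvC (n + 1)
  | n, true :: r => pvR (n + 1) r
  | n, false :: r => pvC n + pvR 0 r

-- character-level machine step (A's loop body once the indexing is resolved)
def pvGA (st : Int × Bool × Bool) (c : Char) : Int × Bool × Bool :=
  let b := c == '0'
  if st.2.2 then (if st.2.1 && b then (st.1 + 1, false, b) else (st.1, true, b))
  else (st.1, false, b)

theorem pvFA_false (l b : Bool) (r : List Bool) :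
    pvFA l false (b :: r) = pvFA false b r := by simp [pvFA]

theorem pvFA_ft (b : Bool) (r : List Bool) :
    pvFA false true (b :: r) = pvFA true b r := by simp [pvFA]

theorem pvFA_tt_t (r : List Bool) :
    pvFA true true (true :: r) = 1 + pvFA false true r := by simp [pvFA]

theorem pvFA_tt_f (r : List Bool) :
    pvFA true true (false :: r) = pvFA true false r := by simp [pvFA]

theorem pv_shift (m : Int) {β : Type} (f : β → Int → β) (init : β) :
    (PySem.List.pyRange 0 m).foldl (fun st i => f st (i + 1)) init
      = (PySem.List.pyRange 1 (m + 1)).foldl f init := by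
  rw [PySem.List.pyRange_one, PySem.List.pyRange_one]
  have h : (m - 0).toNat = (m + 1 - 1).toNat := by omega
  rw [h, List.foldl_map, List.foldl_map]
  refine PySem.List.foldl_congr_mem _ _ _ _ ?_
  intro st k _
  have hk : (0 : Int) + (k : Int) + 1 = 1 + (k : Int) := by ring
  rw [hk]

theorem pv_stepA_eq (cs : List Char) (st : Int × Bool × Bool) (i : Int) :
    pvStepA cs st i = pvGA st (PySem.List.pyGetD cs (i + 1) ' ') := by
  simp [pvStepA, pvGA]

theorem pv_gA_nex (st : Int × Bool × Bool) (c : Char) : (pvGA st c).2.2 = (c == '0') := by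
  simp only [pvGA]
  by_cases h1 : st.2.2 <;> by_cases h2 : st.2.1 && (c == '0') <;> simp [h1, h2]

theorem pv_foldGA_nex (t : List Char) (st : Int × Bool × Bool) :
    (t.foldl pvGA st).2.2 = t.getLast?.elim st.2.2 (· == '0') := by
  induction t generalizing st with
  | nil => rfl
  | cons c r ih =>
    rw [List.foldl_cons, ih]
    cases r with
    | nil => simp [pv_gA_nex]
    | cons d r' =>
      cases hx : (d :: r').getLast? with
      | none => simp at hx
      | some x => simp [List.getLast?_cons_cons, hx]

theorem pv_foldGA_count (l : List Char) (count : Int) (last nex : Bool) :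
    (l.foldl pvGA (count, last, nex)).1
      + (if (l.foldl pvGA (count, last, nex)).2.1 && (l.foldl pvGA (count, last, nex)).2.2
          then 1 else 0)
      = count + pvFA last nex (l.map (· == '0')) := by
  induction l generalizing count last nex with
  | nil => simp [pvFA]
  | cons c r ih =>
    rw [List.foldl_cons, List.map_cons]
    by_cases hnex : nex
    · by_cases hl : last && (c == '0')
      · have : pvGA (count, last, nex) c = (count + 1, false, c == '0') := by
          simp [pvGA, hnex, hl]
        rw [this, ih]
        simp [pvFA, hnex, hl]; omega
      · have : pvGA (count, last, nex) c = (count, true, c == '0') := by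
          simp [pvGA, hnex, hl]
        rw [this, ih]
        simp [pvFA, hnex, hl]
    · have : pvGA (count, last, nex) c = (count, false, c == '0') := by
        simp [pvGA, hnex]
      rw [this, ih]
      simp [pvFA, hnex]

-- the joint invariant between A's machine state and B's run counter
theorem pv_inv (rest : List Bool) :
    (∀ l : Bool, pvFA l false rest = pvR 0 rest)
    ∧ (∀ n : Int, 1 ≤ n → n % 2 = 1 → pvFA false true rest = pvR n rest - (n - 1) / 2)
    ∧ (∀ n : Int, 2 ≤ n → n % 2 = 0 → pvFA true true rest = pvR n rest - (n - 2) / 2) := by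
  induction rest with
  | nil =>
    refine ⟨fun l => by simp [pvFA, pvR, pvC], fun n h1 h2 => ?_, fun n h1 h2 => ?_⟩
    · have h0 : pvFA false true [] = 0 := by simp [pvFA]
      rw [h0, show pvR n [] = pvC (n + 1) from rfl]
      simp only [pvC]; split_ifs with h <;> omega
    · have h0 : pvFA true true [] = 1 := by simp [pvFA]
      rw [h0, show pvR n [] = pvC (n + 1) from rfl]
      simp only [pvC]; split_ifs with h <;> omega
  | cons b r ih =>
    obtain ⟨ih1, ih2, ih3⟩ := ih
    refine ⟨fun l => ?_, fun n h1 h2 => ?_, fun n h1 h2 => ?_⟩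
    · cases b with
      | false =>
        rw [pvFA_false, ih1, show pvR 0 (false :: r) = pvC 0 + pvR 0 r from rfl]
        simp [pvC]
      | true =>
        rw [pvFA_false, ih2 1 (by omega) (by omega),
          show pvR 0 (true :: r) = pvR 1 r from rfl]
        norm_num
    · cases b with
      | false =>
        rw [pvFA_ft, ih1 true, show pvR n (false :: r) = pvC n + pvR 0 r from rfl]
        simp only [pvC]; split_ifs with h <;> omega
      | true =>
        rw [pvFA_ft, ih3 (n + 1) (by omega) (by omega),
          show pvR n (true :: r) = pvR (n + 1) r from rfl]
        omega
    · cases b with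
      | false =>
        rw [pvFA_tt_f, ih1 true, show pvR n (false :: r) = pvC n + pvR 0 r from rfl]
        simp only [pvC]; split_ifs with h <;> omega
      | true =>
        rw [pvFA_tt_t, ih2 (n + 1) (by omega) (by omega),
          show pvR n (true :: r) = pvR (n + 1) r from rfl]
        omega

-- A port evaluates to the machine pvFA
theorem pv_A_eq (s : String) (c : Char) (t : List Char) (hs : s.toList = c :: t) :
    sun_loungers s = pvFA true (c == '0') (t.map (· == '0')) := by
  unfold sun_loungers
  simp only [hs]
  have h1 : List.foldl (pvStepA (c :: t))
      ((0 : Int), true, PySem.List.pyGetD (c :: t) 0 ' ' == '0')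
      (PySem.List.pyRange 0 ((((c :: t).length : Int)) - 1))
      = List.foldl (fun st i => pvGA st (PySem.List.pyGetD (c :: t) (i + 1) ' '))
          ((0 : Int), true, PySem.List.pyGetD (c :: t) 0 ' ' == '0')
          (PySem.List.pyRange 0 ((((c :: t).length : Int)) - 1)) :=
    PySem.List.foldl_congr_mem _ _ _ _ (fun st i _ => pv_stepA_eq (c :: t) st i)
  have h2 : List.foldl (fun st i => pvGA st (PySem.List.pyGetD (c :: t) (i + 1) ' '))
      ((0 : Int), true, PySem.List.pyGetD (c :: t) 0 ' ' == '0')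
      (PySem.List.pyRange 0 ((((c :: t).length : Int)) - 1))
      = List.foldl (fun st j => pvGA st (PySem.List.pyGetD (c :: t) j ' '))
          ((0 : Int), true, PySem.List.pyGetD (c :: t) 0 ' ' == '0')
          (PySem.List.pyRange 1 (((((c :: t).length : Int)) - 1) + 1)) :=
    pv_shift ((((c :: t).length : Int)) - 1)
      (fun st j => pvGA st (PySem.List.pyGetD (c :: t) j ' ')) _
  rw [show (((((c :: t).length : Int)) - 1) + 1) = (((c :: t).length : Int)) from by omega] at h2
  have h3 : List.foldl (fun st j => pvGA st (PySem.List.pyGetD (c :: t) j ' '))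
      ((0 : Int), true, PySem.List.pyGetD (c :: t) 0 ' ' == '0')
      (PySem.List.pyRange 1 (((c :: t).length : Int)))
      = List.foldl pvGA ((0 : Int), true, PySem.List.pyGetD (c :: t) 0 ' ' == '0')
          (List.drop (Int.toNat 1) (c :: t)) :=
    PySem.List.foldl_pyRange_pyGetD' (c :: t) ' ' pvGA _ (by omega : (0:Int) ≤ 1)
  rw [h1, h2, h3]
  have hdrop : List.drop (Int.toNat 1) (c :: t) = t := by simp
  rw [hdrop, PySem.List.pyGetD_zero_cons]
  have hlast : PySem.List.pyGetD (c :: t) (-1) ' ' = (c :: t).getLast (by simp) :=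
    PySem.List.pyGetD_neg_one _ _ (by simp)
  have hnex : (t.foldl pvGA (0, true, (c == '0'))).2.2
      = ((c :: t).getLast (by simp) == '0') := by
    rw [pv_foldGA_nex]
    cases t with
    | nil => simp
    | cons d r =>
      cases hx : (d :: r).getLast? with
      | none => simp at hx
      | some x =>
        have hne : (d :: r : List Char) ≠ [] := by simp
        have hgl : (d :: r).getLast hne = x := by
          have h := List.getLast?_eq_some_getLast (l := d :: r) hne
          rw [hx] at h
          exact (Option.some.inj h).symm
        simp [List.getLast_cons hne, hgl]
  rw [hlast]
  have hcount := pv_foldGA_count t 0 true (c == '0')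
  rw [← hnex]
  omega

-- B-side: guarded sum fold = sum of pvC over the list
theorem pv_sumS (rs : List Int) (t : Int) :
    rs.foldl (fun total k => if k ≠ 0 then total + PySem.Int.floordiv (k - 1) 2 else total) t
      = t + (rs.map pvC).sum := by
  induction rs generalizing t with
  | nil => simp
  | cons k r ih =>
    rw [List.foldl_cons, ih, List.map_cons, List.sum_cons]
    rw [PySem.Int.floordiv_eq_ediv_of_pos (by norm_num)]
    simp only [pvC]
    split_ifs with h <;> ring

theorem pv_Bchar (l : List Char) (rs : List Int) (n : Int) :
    (((l.foldl pvStepB (rs, n)).1 ++ [(l.foldl pvStepB (rs, n)).2 + 1]).map pvC).sum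
      = (rs.map pvC).sum + pvR n (l.map (· == '0')) := by
  induction l generalizing rs n with
  | nil => simp [pvR]
  | cons c r ih =>
    rw [List.foldl_cons, List.map_cons]
    by_cases h : c == '0'
    · have : pvStepB (rs, n) c = (rs, n + 1) := by simp [pvStepB, h]
      rw [this, ih, h]
      simp [pvR]
    · have : pvStepB (rs, n) c = (rs ++ [n], 0) := by simp [pvStepB]; intro hc; simp [hc] at h
      rw [this, ih]
      have hb : (c == '0') = false := by simp_all
      rw [hb]
      simp [pvR]; ring

theorem pv_B_eq (s : String) (cs : List Char) (hs : s.toList = cs) :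
    sun_loungers_alt s = pvR 1 (cs.map (· == '0')) := by
  unfold sun_loungers_alt
  simp only [hs]
  rw [pv_sumS, pv_Bchar]
  simp

-- ===== VERDICT (by name: the statement is the Claim_ definition above) =====
theorem sun_loungers_spec : Claim_equal_sun_loungers := by
  intro beach _ hpre
  unfold Spec_sun_loungers
  cases hcs : beach.toList with
  | nil => exact absurd (String.toList_eq_nil_iff.mp hcs) hpre
  | cons c t =>
    rw [pv_A_eq beach c t hcs, pv_B_eq beach (c :: t) hcs]
    cases hb : (c == '0') with
    | true =>
      have hinv := (pv_inv (t.map (· == '0'))).2.2 2 (by omega) (by omega)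
      rw [List.map_cons, hb]
      show pvFA true true _ = pvR 1 (true :: _)
      rw [hinv, show pvR 1 (true :: t.map (· == '0')) = pvR 2 (t.map (· == '0')) from rfl]
      omega
    | false =>
      have hinv := (pv_inv (t.map (· == '0'))).1 true
      rw [List.map_cons, hb]
      show pvFA true false _ = pvR 1 (false :: _)
      rw [hinv, show pvR 1 (false :: t.map (· == '0')) = pvC 1 + pvR 0 (t.map (· == '0')) from rfl]
      simp [pvC]

@[simp]
theorem sun_loungers_raises : Claim_raises_sun_loungers := by
  unfold Claim_raises_sun_loungers
  exact ⟨fun beach _ hr hp => hp hr, by decide⟩
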